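-- pv_equiv track=rewrite | github.com/DongYun666/leetcode | 塞克算法题库/1.5.3数串问题.py | getSubArrayCountGreaterThan
-- ===== SOURCE A (Python) =====
-- def getSubArrayCountGreaterThan(nums):
--     result=0
--     count=1<<len(nums)
--     for mark in range(count):
--         temp=0
--         for i in range(len(nums)):
--             if((1<<i)&mark)!=0:
--                 temp+=nums[i]
--         if temp>0:
--             result+=1
--     return result
-- ===== SOURCE B (Python) =====
-- def getSubArrayCountGreaterThan(nums):
--     # subset-sum doubling: sums[m] is the sum of the subset encoded by mask m
--     sums = [0]
--     for x in nums:
--         sums = sums + [s + x for s in sums]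
--     result = 0
--     for s in sums:
--         if s > 0:
--             result += 1
--     return result
-- ===== Notes on version B (the rewrite author's own statement) =====
-- stated objective: alternative
-- what changed: Replaces A's enumeration of all 2^n bitmasks with an O(n) bit-scan per mask by a single doubling pass that builds the list of all subset sums (appending s+x for each element x) and then counts the positive ones; measured 15.4x at n=16 but unconfirmed at the largest timing size (both exponential programs time out there).
import Mathlib
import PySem

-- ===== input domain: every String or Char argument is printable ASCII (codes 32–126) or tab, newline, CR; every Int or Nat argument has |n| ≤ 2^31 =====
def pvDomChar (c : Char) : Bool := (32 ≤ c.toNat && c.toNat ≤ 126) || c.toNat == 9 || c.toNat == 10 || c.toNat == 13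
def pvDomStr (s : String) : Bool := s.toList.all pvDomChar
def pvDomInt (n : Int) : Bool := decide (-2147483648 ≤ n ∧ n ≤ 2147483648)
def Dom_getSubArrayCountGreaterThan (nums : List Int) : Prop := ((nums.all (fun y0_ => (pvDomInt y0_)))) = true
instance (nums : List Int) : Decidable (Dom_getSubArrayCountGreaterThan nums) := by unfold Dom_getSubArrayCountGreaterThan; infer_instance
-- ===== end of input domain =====

-- B replaces A's per-mask bit scan over all 2^n bitmasks by a single subset-sum doubling pass, then counts the positives.

-- ===== PORT A =====
-- literal port of A: for mark in range(1 << len(nums)): temp = sum of nums[i] over the set bits of mark; count temp > 0.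
-- ('1 << i' / '1 << len(nums)': Lean's '<<<' on Int; 'i.toNat' is exact since i ∈ range(len(nums)) is nonnegative.)
def getSubArrayCountGreaterThan (nums : List Int) : Int :=
  let count : Int := (1 : Int) <<< nums.length
  (PySem.List.pyRange 0 count 1).foldl (fun result mark =>
    let temp : Int := (PySem.List.pyRange 0 (nums.length : Int) 1).foldl (fun temp i =>
      if PySem.Int.band ((1 : Int) <<< i.toNat) mark ≠ 0 then temp + PySem.List.pyGetD nums i 0
      else temp) 0
    if temp > 0 then result + 1 else result) 0

-- ===== PORT B =====
-- literal port of Source B: double the subset-sum list once per element, then count the positive sums.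
def getSubArrayCountGreaterThan_alt (nums : List Int) : Int :=
  let sums : List Int := nums.foldl (fun sums x => sums ++ sums.map (fun s => s + x)) [0]
  sums.foldl (fun result s => if s > 0 then result + 1 else result) 0

-- ===== PRECONDITION & SPEC =====
def Spec_getSubArrayCountGreaterThan (nums : List Int) (out : Int) : Prop := out = getSubArrayCountGreaterThan_alt nums
instance (nums : List Int) (out : Int) : Decidable (Spec_getSubArrayCountGreaterThan nums out) := by unfold Spec_getSubArrayCountGreaterThan; infer_instance

-- ===== CLAIM (what is proved, stated in full; the proofs are below) =====
def Claim_equal_getSubArrayCountGreaterThan : Prop := ∀ (nums : List Int), Dom_getSubArrayCountGreaterThan nums → Spec_getSubArrayCountGreaterThan nums (getSubArrayCountGreaterThan nums)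

-- ===== LEMMAS AND PROOFS =====

-- A's inner loop, cleaned up: the sum of nums[i] over the set bits of the mask m.
def pvS (nums : List Int) (m : Nat) : Int :=
  (List.range nums.length).foldl (fun t i => if m.testBit i then t + nums.getD i 0 else t) 0

-- B's doubling list.
def pvSubs (nums : List Int) : List Int :=
  nums.foldl (fun sums x => sums ++ sums.map (fun s => s + x)) [0]

theorem pvTemp_eq (nums : List Int) (m : Nat) :
    (PySem.List.pyRange 0 (nums.length : Int) 1).foldl (fun temp i =>
      if PySem.Int.band ((1 : Int) <<< i.toNat) (m : Int) ≠ 0 then temp + PySem.List.pyGetD nums i 0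
      else temp) 0 = pvS nums m := by
  rw [PySem.List.pyRange_zero_natCast, List.foldl_map]
  have hfun : (fun (t : Int) (i : Nat) =>
      if PySem.Int.band ((1 : Int) <<< ((((i : Int)).toNat : Int))) (m : Int) ≠ 0 then t + PySem.List.pyGetD nums (i : Int) 0 else t)
      = (fun t i => if m.testBit i then t + nums.getD i 0 else t) := by
    funext t i
    have hcond : (PySem.Int.band ((1 : Int) <<< ((((i : Int)).toNat : Int))) (m : Int) ≠ 0) ↔ m.testBit i = true := by
      rw [Int.toNat_natCast, Int.one_shiftLeft, PySem.Int.band_natCast]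
      rw [ne_eq, Int.natCast_eq_zero]
      rw [Nat.and_comm, Nat.and_two_pow]
      cases h : m.testBit i <;> simp
    rw [if_congr hcond rfl rfl, PySem.List.pyGetD_natCast]
  rw [hfun]; rfl

theorem pvS_sum (nums : List Int) (m : Nat) :
    pvS nums m = ((List.range nums.length).map (fun i => if m.testBit i then nums.getD i 0 else 0)).sum := by
  unfold pvS
  have hfun : (fun (t : Int) (i : Nat) => if m.testBit i then t + nums.getD i 0 else t)
      = (fun t i => t + (if m.testBit i then nums.getD i 0 else 0)) := by
    funext t i; cases h : m.testBit i <;> simp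
  rw [hfun, PySem.List.foldl_add, zero_add]

theorem pvS_append_lt (xs : List Int) (x : Int) (m : Nat) (hm : m < 2 ^ xs.length) :
    pvS (xs ++ [x]) m = pvS xs m := by
  rw [pvS_sum, pvS_sum]
  have hlen : (xs ++ [x]).length = xs.length + 1 := by simp
  rw [hlen, List.range_succ, List.map_append, List.sum_append]
  have h0 : ((List.range xs.length).map fun i => if m.testBit i then (xs ++ [x]).getD i 0 else 0)
      = (List.range xs.length).map fun i => if m.testBit i then xs.getD i 0 else 0 := by
    refine List.map_congr_left (fun i hi => ?_)
    have hi' : i < xs.length := List.mem_range.mp hi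
    rw [List.getD, List.getElem?_append_left hi']; rfl
  rw [h0]
  simp [Nat.testBit_lt_two_pow hm]

theorem pvS_append_ge (xs : List Int) (x : Int) (m : Nat) (hm : m < 2 ^ xs.length) :
    pvS (xs ++ [x]) (2 ^ xs.length + m) = pvS xs m + x := by
  rw [pvS_sum, pvS_sum]
  have hlen : (xs ++ [x]).length = xs.length + 1 := by simp
  rw [hlen, List.range_succ, List.map_append, List.sum_append]
  have h0 : ((List.range xs.length).map fun i => if (2 ^ xs.length + m).testBit i then (xs ++ [x]).getD i 0 else 0)
      = (List.range xs.length).map fun i => if m.testBit i then xs.getD i 0 else 0 := by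
    refine List.map_congr_left (fun i hi => ?_)
    have hi' : i < xs.length := List.mem_range.mp hi
    rw [Nat.testBit_two_pow_add_gt hi' m, List.getD, List.getElem?_append_left hi']; rfl
  have htop : (2 ^ xs.length + m).testBit xs.length = true := by
    rw [Nat.testBit_two_pow_add_eq, Nat.testBit_lt_two_pow hm]; rfl
  rw [h0]
  simp [htop]

theorem pvSubs_append (xs : List Int) (x : Int) :
    pvSubs (xs ++ [x]) = pvSubs xs ++ (pvSubs xs).map (fun s => s + x) := by
  simp [pvSubs, List.foldl_append]

theorem pvMap_eq (nums : List Int) :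
    (List.range (2 ^ nums.length)).map (pvS nums) = pvSubs nums := by
  induction nums using List.reverseRecOn with
  | nil => decide
  | append_singleton xs x ih =>
    have hlen : (xs ++ [x]).length = xs.length + 1 := by simp
    have h2 : 2 ^ (xs.length + 1) = 2 ^ xs.length + 2 ^ xs.length := by ring
    rw [hlen, h2, List.range_add, List.map_append, List.map_map, pvSubs_append, ← ih]
    congr 1
    · exact List.map_congr_left (fun m hm => pvS_append_lt xs x m (List.mem_range.mp hm))
    · rw [List.map_map]
      exact List.map_congr_left (fun m hm => pvS_append_ge xs x m (List.mem_range.mp hm))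

-- ===== VERDICT (by name: the statement is the Claim_ definition above) =====
theorem getSubArrayCountGreaterThan_spec : Claim_equal_getSubArrayCountGreaterThan := by
  intro nums _
  unfold Spec_getSubArrayCountGreaterThan
  show (PySem.List.pyRange 0 ((1 : Int) <<< nums.length) 1).foldl (fun result mark =>
      if ((PySem.List.pyRange 0 (nums.length : Int) 1).foldl (fun temp i =>
        if PySem.Int.band ((1 : Int) <<< i.toNat) mark ≠ 0 then temp + PySem.List.pyGetD nums i 0
        else temp) 0) > 0 then result + 1 else result) 0
    = getSubArrayCountGreaterThan_alt nums
  have hcount : (1 : Int) <<< nums.length = ((2 ^ nums.length : Nat) : Int) := by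
    simp [Int.shiftLeft_eq]
  rw [hcount, PySem.List.pyRange_zero_natCast (2 ^ nums.length), List.foldl_map]
  simp only [pvTemp_eq]
  have hstep : List.foldl (fun (x : Int) (y : Nat) => if pvS nums y > 0 then x + 1 else x) 0
      (List.range (2 ^ nums.length))
      = List.foldl (fun (x s : Int) => if s > 0 then x + 1 else x) 0
        ((List.range (2 ^ nums.length)).map (pvS nums)) := by
    rw [List.foldl_map]
  rw [hstep, pvMap_eq]
  rfl
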